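-- pv_equiv track=rewrite | github.com/caunion/leetcode | solutions/CreateMaximumNumber.py | solution
-- ===== SOURCE A (Python) =====
-- def solution(nums1, nums2, k):
--     """
--     :type nums1: List[int]
--     :type nums2: List[int]
--     :type k: int
--     :rtype: List[int]
--     """
--     def getMax(nums, t):
--         ans = []
--         size = len(nums)
--         for x in range(size):
--             while ans and len(ans) + size - x > t and ans[-1] < nums[x]:
--                 ans.pop()
--             if len(ans) < t:
--                 ans += nums[x],
--         return ans
--
--     def merge(nums1, nums2):
--         ans = []
--         while nums1 or nums2:
--             if nums1 > nums2:
--                 ans += nums1[0],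
--                 nums1 = nums1[1:]
--             else:
--                 ans += nums2[0],
--                 nums2 = nums2[1:]
--         return ans
--
--     len1, len2 = len(nums1), len(nums2)
--     res = []
--     for x in range(max(0, k - len2), min(k, len1) + 1):
--         tmp = merge(getMax(nums1, x), getMax(nums2, k - x))
--         res = max(tmp, res)
--     return res
-- ===== SOURCE B (Python) =====
-- def solution(nums1, nums2, k):
--     def pick(nums, t):
--         # repeated windowed-maximum greedy instead of a monotonic stack
--         ans = []
--         while t > 0:
--             window = nums[:len(nums) - t + 1]
--             m = max(window)
--             j = window.index(m)          # leftmost occurrence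
--             ans.append(m)
--             nums = nums[j + 1:]
--             t -= 1
--         return ans
--
--     def greater(a, b):
--         # hand-rolled lexicographic a > b
--         for x, y in zip(a, b):
--             if x != y:
--                 return x > y
--         return len(a) > len(b)
--
--     def merge(a, b):
--         out = []
--         while a and b:
--             if greater(a, b):
--                 out.append(a[0])
--                 a = a[1:]
--             else:
--                 out.append(b[0])
--                 b = b[1:]
--         return out + a + b
--
--     len1, len2 = len(nums1), len(nums2)
--     cands = [merge(pick(nums1, x), pick(nums2, k - x))
--              for x in range(max(0, k - len2), min(k, len1) + 1)]
--     return max(cands, default=[])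
-- ===== Notes on version B (the rewrite author's own statement) =====
-- stated objective: alternative
-- what changed: The monotonic-stack subsequence builder is replaced by a repeated windowed-maximum greedy (scan each shrinking window for its leftmost maximum), the Python list comparison in merge is hand-rolled elementwise with the loop reduced to the both-nonempty case plus a wholesale tail append, and the running max over splits becomes max() over a list of candidates.
import Mathlib
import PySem

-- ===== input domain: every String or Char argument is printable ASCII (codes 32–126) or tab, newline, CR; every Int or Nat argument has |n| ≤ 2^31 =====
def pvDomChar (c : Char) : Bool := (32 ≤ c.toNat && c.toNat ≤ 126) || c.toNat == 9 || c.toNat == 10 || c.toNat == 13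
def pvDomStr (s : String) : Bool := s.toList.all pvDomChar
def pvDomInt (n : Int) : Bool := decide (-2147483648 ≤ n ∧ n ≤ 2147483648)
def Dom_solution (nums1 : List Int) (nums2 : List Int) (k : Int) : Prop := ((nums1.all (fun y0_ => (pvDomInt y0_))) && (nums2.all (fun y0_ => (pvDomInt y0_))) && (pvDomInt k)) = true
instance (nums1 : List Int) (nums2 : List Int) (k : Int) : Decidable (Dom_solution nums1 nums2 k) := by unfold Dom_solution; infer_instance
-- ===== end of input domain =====

-- B replaces A's monotonic-stack subsequence builder by a repeated windowed-maximum greedy,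
-- hand-rolls the lexicographic comparison, and takes the max over a list of candidates
-- (objective: alternative — a genuinely different traversal, similar cost).

-- ===== PORT A =====

-- Python's lexicographic '<' on lists of ints (used by A's 'nums1 > nums2' and 'max')
def pyListLt : List Int → List Int → Bool
  | [], [] => false
  | [], _ :: _ => true
  | _ :: _, [] => false
  | a :: as, b :: bs => if a < b then true else if b < a then false else pyListLt as bs

-- the inner 'while ans and len(ans) + size - x > t and ans[-1] < nums[x]: ans.pop()'
-- (r = size - x, the number of elements not yet consumed, including the current one;
--  ans[-1] is ans.getLast?.getD 0 — the default is never read since the first conjunct demands ans ≠ [])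
def aPop (t : Int) (v : Int) (r : Int) (ans : List Int) : List Int :=
  if h : ans ≠ [] ∧ ((ans.length : Int) + r > t) ∧ (ans.getLast?.getD 0 < v) then
    aPop t v r ans.dropLast
  else ans
termination_by ans.length
decreasing_by
  have := List.length_pos_of_ne_nil h.1
  simp [List.length_dropLast]; omega

-- the 'for x in range(size)' loop of getMax
def aGo (t : Int) (ans : List Int) : List Int → List Int
  | [] => ans
  | v :: rest =>
      let ans1 := aPop t v ((rest.length : Int) + 1) ans
      let ans2 := if (ans1.length : Int) < t then ans1 ++ [v] else ans1
      aGo t ans2 rest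

def aGetMax (nums : List Int) (t : Int) : List Int := aGo t [] nums

-- 'while nums1 or nums2: if nums1 > nums2: take nums1[0] else take nums2[0]'
def aMerge : List Int → List Int → List Int
  | [], [] => []
  | [], b :: bs => b :: aMerge [] bs          -- '[] > nums2' is False
  | a :: as, [] => a :: aMerge as []          -- 'nums1 > []' is True
  | a :: as, b :: bs =>
      if pyListLt (b :: bs) (a :: as) then a :: aMerge as (b :: bs)
      else b :: aMerge (a :: as) bs
termination_by a b => a.length + b.length

def solution (nums1 : List Int) (nums2 : List Int) (k : Int) : List Int :=
  let len1 : Int := nums1.length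
  let len2 : Int := nums2.length
  (PySem.List.pyRange (max 0 (k - len2)) (min k len1 + 1) 1).foldl
    (fun res x =>
      let tmp := aMerge (aGetMax nums1 x) (aGetMax nums2 (k - x))
      if pyListLt tmp res then res else tmp)    -- res = max(tmp, res)
    []

-- ===== PORT B =====

-- 'while t > 0: window = nums[:len(nums)-t+1]; m = max(window); j = window.index(m); ...'
def bPick (nums : List Int) (t : Int) : List Int :=
  if h : (0 : Int) < t then
    let window := PySem.List.slice nums none (some ((nums.length : Int) - t + 1))
    match PySem.List.max? window (fun x => x) with
    | none => []          -- Python 'max([])' raises; unreachable from solution_alt (there 0 < t ≤ len nums)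
    | some m =>
        match PySem.List.index? window m with
        | none => []      -- unreachable: m ∈ window
        | some j => m :: bPick (PySem.List.slice nums (some ((j : Int) + 1)) none) (t - 1)
  else []
termination_by t.toNat
decreasing_by omega

-- 'for x, y in zip(a, b): if x != y: return x > y' then 'return len(a) > len(b)'
def bGreater : List Int → List Int → Bool
  | x :: as, y :: bs => if x ≠ y then decide (y < x) else bGreater as bs
  | a, b => decide ((b.length : Int) < (a.length : Int))

-- 'while a and b: ...; return out + a + b'
def bMerge : List Int → List Int → List Int
  | x :: as, y :: bs =>
      if bGreater (x :: as) (y :: bs) then x :: bMerge as (y :: bs)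
      else y :: bMerge (x :: as) bs
  | a, b => a ++ b
termination_by a b => a.length + b.length

-- Python's builtin 'max(cands, default=[])' (first maximal element)
def bMaxList (cs : List (List Int)) : List Int :=
  match cs with
  | [] => []
  | c :: rest => rest.foldl (fun best x => if pyListLt best x then x else best) c

def solution_alt (nums1 : List Int) (nums2 : List Int) (k : Int) : List Int :=
  let len1 : Int := nums1.length
  let len2 : Int := nums2.length
  bMaxList ((PySem.List.pyRange (max 0 (k - len2)) (min k len1 + 1) 1).map
    (fun x => bMerge (bPick nums1 x) (bPick nums2 (k - x))))

-- ===== PRECONDITION & SPEC =====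
def Spec_solution (nums1 : List Int) (nums2 : List Int) (k : Int) (out : List Int) : Prop := out = solution_alt nums1 nums2 k
instance (nums1 : List Int) (nums2 : List Int) (k : Int) (out : List Int) : Decidable (Spec_solution nums1 nums2 k out) := by unfold Spec_solution; infer_instance

-- ===== CLAIM (what is proved, stated in full; the proofs are below) =====
def Claim_equal_solution : Prop := ∀ (nums1 : List Int) (nums2 : List Int) (k : Int), Dom_solution nums1 nums2 k → Spec_solution nums1 nums2 k (solution nums1 nums2 k)

-- ===== LEMMAS AND PROOFS =====

theorem pyListLt_nil_right (a : List Int) : pyListLt a [] = false := by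
  cases a <;> simp [pyListLt]

theorem pyListLt_asymm : ∀ (a b : List Int), pyListLt a b = true → pyListLt b a = false := by
  intro a
  induction a with
  | nil => intro b _; exact pyListLt_nil_right b
  | cons x as ih =>
      intro b h
      cases b with
      | nil => simp [pyListLt] at h
      | cons y bs =>
          simp only [pyListLt] at h ⊢
          split_ifs at h ⊢ <;> first | rfl | omega | (exact ih bs h)

theorem pyListLt_conn : ∀ (a b : List Int), pyListLt a b = false → pyListLt b a = false → a = b := by
  intro a
  induction a with
  | nil => intro b h _; cases b <;> simp_all [pyListLt]
  | cons x as ih =>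
      intro b h1 h2
      cases b with
      | nil => simp [pyListLt] at h2
      | cons y bs =>
          simp only [pyListLt] at h1 h2
          split_ifs at h1 h2 <;> try omega
          have hxy : x = y := by omega
          have := ih bs h1 h2
          simp [hxy, this]

theorem step_comm (u w : List Int) :
    (if pyListLt u w then w else u) = (if pyListLt w u then u else w) := by
  by_cases h1 : pyListLt u w
  · have h2 := pyListLt_asymm _ _ h1
    simp [h1, h2]
  · by_cases h2 : pyListLt w u
    · simp [h1, h2]
    · have := pyListLt_conn u w (by simpa using h1) (by simpa using h2)
      simp [this]

theorem bGreater_eq (a b : List Int) : bGreater a b = pyListLt b a := by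
  induction a generalizing b with
  | nil => cases b <;> simp [bGreater, pyListLt] <;> positivity
  | cons x as ih =>
      cases b with
      | nil => simp [bGreater, pyListLt]
      | cons y bs =>
          simp only [bGreater, pyListLt]
          by_cases hxy : x = y
          · subst hxy; simp [ih]
          · rcases lt_trichotomy x y with h | h | h
            · simp [hxy, h, not_lt_of_gt h]
            · exact absurd h hxy
            · simp [hxy, h, not_lt_of_gt h]

theorem merge_eq (a b : List Int) : aMerge a b = bMerge a b := by
  fun_induction aMerge a b with
  | case1 => simp [bMerge]
  | case2 b bs ih => simp [bMerge, ih]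
  | case3 a as ih => simp [bMerge, ih]
  | case4 a as b bs h ih => simp only [bMerge, bGreater_eq]; rw [if_pos h, ih]
  | case5 a as b bs h ih => simp only [bMerge, bGreater_eq]; rw [if_neg h, ih]

-- ---- properties of A's pop loop ----

theorem aPop_nil (t v r : Int) : aPop t v r [] = [] := by
  unfold aPop; simp

theorem aPop_sublist (t v r : Int) (ans : List Int) : (aPop t v r ans).Sublist ans := by
  fun_induction aPop t v r ans with
  | case1 ans h ih => exact ih.trans (List.dropLast_sublist ans)
  | case2 => exact List.Sublist.refl _

-- when the incoming element dominates the whole stack and enough elements remain, everything is popped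
theorem aPop_flush (t v r : Int) (hr : t ≤ r) :
    ∀ (ans : List Int), (∀ a ∈ ans, a < v) → aPop t v r ans = [] := by
  intro ans
  fun_induction aPop t v r ans with
  | case1 ans h ih =>
      intro hall
      exact ih (fun x hx => hall x ((List.dropLast_sublist ans).mem hx))
  | case2 ans h =>
      intro hall
      by_cases hne : ans = []
      · exact hne
      · exfalso
        apply h
        have hlen := List.length_pos_of_ne_nil hne
        obtain ⟨a, ha⟩ := List.getLast?_isSome.mpr hne |> Option.isSome_iff_exists.mp
        refine ⟨hne, by omega, ?_⟩
        rw [ha]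
        exact hall a (List.mem_of_getLast? ha)

-- a protected bottom element m is never popped
theorem aPop_cons_keep (t v r m : Int) (hnp : ¬(1 + r > t ∧ m < v)) :
    ∀ (q : List Int), aPop t v r (m :: q) = m :: aPop (t - 1) v r q := by
  intro q
  induction q using List.reverseRecOn with
  | nil =>
      rw [aPop, aPop_nil]
      rw [dif_neg]
      intro ⟨_, hlen, hlast⟩
      simp only [List.getLast?_singleton, Option.getD_some, List.length_cons,
        List.length_nil] at hlen hlast
      exact hnp ⟨by push_cast at hlen ⊢; omega, hlast⟩
  | append_singleton q' a ih =>
      conv_lhs => rw [aPop]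
      conv_rhs => rw [aPop]
      have hml : (m :: (q' ++ [a])) = (m :: q') ++ [a] := by simp
      by_cases hc : (q' ++ [a] ≠ [] ∧ ((q' ++ [a]).length : Int) + r > t - 1 ∧
          ((q' ++ [a]).getLast?.getD 0 < v))
      · rw [dif_pos hc]
        have hc' : (m :: (q' ++ [a]) ≠ [] ∧ ((m :: (q' ++ [a])).length : Int) + r > t ∧
            ((m :: (q' ++ [a])).getLast?.getD 0 < v)) := by
          obtain ⟨_, hlen, hlast⟩ := hc
          refine ⟨by simp, by simp only [List.length_cons] at *; push_cast at *; omega, ?_⟩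
          rw [hml, List.getLast?_concat]
          rw [List.getLast?_concat] at hlast
          exact hlast
        rw [dif_pos hc']
        have hd : (m :: (q' ++ [a])).dropLast = m :: q' := by
          rw [hml, List.dropLast_concat]
        rw [hd, List.dropLast_concat]
        exact ih
      · rw [dif_neg hc]
        rw [dif_neg]
        intro ⟨_, hlen, hlast⟩
        apply hc
        refine ⟨by simp, by simp only [List.length_cons] at *; push_cast at *; omega, ?_⟩
        rw [hml, List.getLast?_concat] at hlast
        rw [List.getLast?_concat]
        exact hlast

-- with t ≤ 0 nothing is ever pushed
theorem aGo_zero (t : Int) (ht : t ≤ 0) : ∀ (rest : List Int), aGo t [] rest = [] := by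
  intro rest
  induction rest with
  | nil => rfl
  | cons v r ih =>
      rw [aGo]
      simp only [aPop_nil]
      rw [if_neg (by simp; omega)]
      exact ih

-- a protected bottom element m stays at the bottom for a whole run, and the run above it
-- is the run with budget t-1
theorem aGo_cons_keep (t m : Int) :
    ∀ (s q : List Int),
      (∀ (i : Nat) (hi : i < s.length), ((s.length : Int) - i + 1 > t) → s[i] ≤ m) →
      aGo t (m :: q) s = m :: aGo (t - 1) q s := by
  intro s
  induction s with
  | nil => intro q _; rfl
  | cons v s' ih =>
      intro q H
      rw [aGo, aGo]
      have h0 := H 0 (by simp)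
      have hnp : ¬(1 + ((s'.length : Int) + 1) > t ∧ m < v) := by
        intro ⟨hl, hv⟩
        have : v ≤ m := by
          apply h0
          simp only [List.length_cons]
          push_cast
          omega
        simp only [List.getElem_cons_zero] at this
        omega
      rw [aPop_cons_keep t v ((s'.length : Int) + 1) m hnp q]
      set q1 := aPop (t - 1) v ((s'.length : Int) + 1) q with hq1
      have hlen : ((m :: q1).length : Int) = (q1.length : Int) + 1 := by simp
      have Hs : ∀ (i : Nat) (hi : i < s'.length), ((s'.length : Int) - i + 1 > t) → s'[i] ≤ m := by
        intro i hi hgt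
        have := H (i + 1) (by simpa using Nat.succ_lt_succ hi)
          (by simp only [List.length_cons]; push_cast at hgt ⊢; omega)
        simpa using this
      by_cases hp : (q1.length : Int) < t - 1
      · rw [if_pos (by rw [hlen]; omega), if_pos hp]
        have hcons : (m :: q1) ++ [v] = m :: (q1 ++ [v]) := by simp
        rw [hcons]
        exact ih _ Hs
      · rw [if_neg (by rw [hlen]; omega), if_neg hp]
        exact ih _ Hs

-- prefix runner: processing u while 'extra' further elements wait behind it
def goPre (t : Int) (extra : Nat) (ans : List Int) : List Int → List Int
  | [] => ans
  | v :: rest =>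
      let ans1 := aPop t v ((rest.length : Int) + extra + 1) ans
      let ans2 := if (ans1.length : Int) < t then ans1 ++ [v] else ans1
      goPre t extra ans2 rest

theorem aGo_split (t : Int) (w : List Int) :
    ∀ (u ans : List Int), aGo t ans (u ++ w) = aGo t (goPre t w.length ans u) w := by
  intro u
  induction u with
  | nil => intro ans; rfl
  | cons v u' ih =>
      intro ans
      rw [List.cons_append, aGo, goPre]
      have hr : (((u' ++ w).length : Int) + 1) = ((u'.length : Int) + (w.length : Int) + 1) := by
        simp
      rw [hr]
      exact ih _

theorem goPre_mem (t : Int) (e : Nat) :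
    ∀ (u ans : List Int) (x : Int), x ∈ goPre t e ans u → x ∈ ans ∨ x ∈ u := by
  intro u
  induction u with
  | nil => intro ans x hx; exact Or.inl hx
  | cons v u' ih =>
      intro ans x hx
      rw [goPre] at hx
      rcases ih _ x hx with h | h
      · by_cases hp : ((aPop t v ((u'.length : Int) + e + 1) ans).length : Int) < t
        · rw [if_pos hp] at h
          rcases List.mem_append.mp h with h' | h'
          · exact Or.inl ((aPop_sublist _ _ _ _).mem h')
          · simp at h'; subst h'; exact Or.inr (by simp)
        · rw [if_neg hp] at h
          exact Or.inl ((aPop_sublist _ _ _ _).mem h)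
      · exact Or.inr (List.mem_cons_of_mem _ h)

-- ---- the central equivalence: monotonic stack = repeated windowed maximum ----

theorem pick_eq_nat : ∀ (t : Nat) (nums : List Int), t ≤ nums.length →
    aGetMax nums (t : Int) = bPick nums (t : Int) := by
  intro t
  induction t with
  | zero =>
      intro nums _
      rw [bPick, aGetMax]
      rw [dif_neg (by omega)]
      have h0 : ((0 : Nat) : Int) = 0 := rfl
      rw [h0]
      exact aGo_zero 0 le_rfl nums
  | succ t' ih =>
      intro nums hle
      set n := nums.length with hn
      have hpos : (0 : Int) < ((t' + 1 : Nat) : Int) := by push_cast; omega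
      have hslice : PySem.List.slice nums none (some ((n : Int) - ((t' + 1 : Nat) : Int) + 1))
          = nums.take (n - t') := by
        have hb : (0 : Int) ≤ (n : Int) - ((t' + 1 : Nat) : Int) + 1 := by push_cast; omega
        rw [PySem.List.slice_to _ hb]
        congr 1
        push_cast
        omega
      set window := nums.take (n - t') with hwdef
      have hwlen : window.length = n - t' := by
        rw [hwdef, List.length_take]; omega
      have hwne : window ≠ [] := by
        intro he
        have := congrArg List.length he
        rw [hwlen] at this
        simp at this; omega
      obtain ⟨m, hm⟩ : ∃ m, PySem.List.max? window (fun x => x) = some m := by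
        rcases h : PySem.List.max? window (fun x => x) with _ | ⟨m⟩
        · exact absurd ((PySem.List.max?_eq_none_iff window (fun x => x)).mp h) hwne
        · exact ⟨m, rfl⟩
      have hmmem : m ∈ window := PySem.List.max?_mem hm
      have hmmax : ∀ y ∈ window, y ≤ m := fun y hy => PySem.List.max?_isMax hm y hy
      obtain ⟨j, hj⟩ : ∃ j, PySem.List.index? window m = some j := by
        rcases h : PySem.List.index? window m with _ | ⟨j⟩
        · exact absurd ((PySem.List.index?_eq_none_iff window m).mp h) (by simpa using hmmem)
        · exact ⟨j, rfl⟩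
      obtain ⟨pre, suf, hwsplit, hprelen, hmnotpre⟩ := (PySem.List.index?_eq_some_iff window m j).mp hj
      set s := suf ++ nums.drop (n - t') with hsdef
      have hnums : nums = pre ++ m :: s := by
        have hh : nums = window ++ nums.drop (n - t') := by
          rw [hwdef, List.take_append_drop]
        rw [hsdef]
        conv_lhs => rw [hh, hwsplit]
        simp
      have hjlt : j < n - t' := by
        have := congrArg List.length hwsplit
        rw [hwlen] at this
        simp [hprelen] at this
        omega
      have hslen : s.length = n - 1 - j := by
        have := congrArg List.length hnums
        simp [hprelen] at this
        omega
      have hslen' : t' ≤ s.length := by omega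
      have hprelt : ∀ a ∈ pre, a < m := by
        intro a ha
        have hale : a ≤ m := hmmax a (by rw [hwsplit]; exact List.mem_append_left _ ha)
        have hane : a ≠ m := fun he => hmnotpre (he ▸ ha)
        omega
      have hH : ∀ (i : Nat) (hi : i < s.length),
          ((s.length : Int) - i + 1 > ((t' + 1 : Nat) : Int)) → s[i] ≤ m := by
        intro i hi hgt
        have hiw : j + 1 + i < n - t' := by
          rw [hslen] at hi
          have hgt' : (s.length : Int) - i + 1 > (t' : Int) + 1 := by push_cast at hgt ⊢; omega
          rw [hslen] at hgt'
          push_cast at hgt'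
          omega
        apply hmmax
        have h1 : window[j + 1 + i]? = some (s[i]'hi) := by
          rw [hwdef, List.getElem?_take_of_lt hiw, hnums,
            List.getElem?_append_right (by omega)]
          have h2 : j + 1 + i - pre.length = i + 1 := by omega
          rw [h2]
          simp [hi]
        exact List.mem_of_getElem? h1
      have hA : aGetMax nums ((t' + 1 : Nat) : Int) = m :: aGetMax s (t' : Int) := by
        rw [aGetMax]
        conv_lhs => rw [hnums]
        rw [aGo_split]
        set Q := goPre ((t' + 1 : Nat) : Int) (m :: s).length [] pre with hQ
        have hQlt : ∀ a ∈ Q, a < m := by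
          intro a ha
          rcases goPre_mem _ _ _ _ _ ha with h | h
          · simp at h
          · exact hprelt a h
        rw [aGo]
        have hflush : aPop ((t' + 1 : Nat) : Int) m ((s.length : Int) + 1) Q = [] := by
          exact aPop_flush _ _ _ (by rw [hslen]; push_cast; omega) _ hQlt
        rw [hflush]
        rw [if_pos (by simp)]
        simp only [List.nil_append]
        rw [aGo_cons_keep _ _ _ _ hH]
        have hc : ((t' + 1 : Nat) : Int) - 1 = (t' : Int) := by push_cast; omega
        rw [hc, aGetMax]
      have hB : bPick nums ((t' + 1 : Nat) : Int) = m :: bPick s (t' : Int) := by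
        rw [bPick, dif_pos hpos]
        simp only [← hn, hslice, hm, hj]
        have hdrop : PySem.List.slice nums (some ((j : Int) + 1)) none = s := by
          rw [PySem.List.slice_from _ (by omega)]
          have h1 : ((j : Int) + 1).toNat = j + 1 := by omega
          rw [h1]
          conv_lhs => rw [hnums]
          have h2 : pre ++ m :: s = (pre ++ [m]) ++ s := by simp
          rw [h2]
          have h3 : j + 1 = (pre ++ [m]).length := by simp [hprelen]
          rw [h3, List.drop_left]
        rw [hdrop]
        have harg : ((t' + 1 : Nat) : Int) - 1 = (t' : Int) := by push_cast; ring
        rw [harg]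
      rw [hA, hB, ih s hslen']

theorem pick_eq_int (nums : List Int) (t : Int) (h0 : 0 ≤ t) (h1 : t ≤ (nums.length : Int)) :
    aGetMax nums t = bPick nums t := by
  obtain ⟨n, rfl⟩ := Int.eq_ofNat_of_zero_le h0
  exact pick_eq_nat n nums (by exact_mod_cast h1)

-- ---- Python's max(list) as a fold vs A's running max ----

theorem foldmax_gen (g : Int → List Int) :
    ∀ (l : List Int) (c : List Int),
      l.foldl (fun res x => if pyListLt (g x) res then res else g x) c
        = (l.map g).foldl (fun best x => if pyListLt best x then x else best) c := by
  intro l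
  induction l with
  | nil => intro c; rfl
  | cons x l' ih =>
      intro c
      simp only [List.foldl_cons, List.map_cons]
      rw [step_comm (g x) c]
      exact ih _

theorem foldmax (g : Int → List Int) (l : List Int) :
    l.foldl (fun res x => if pyListLt (g x) res then res else g x) []
      = bMaxList (l.map g) := by
  cases l with
  | nil => rfl
  | cons x l' =>
      simp only [List.foldl_cons, List.map_cons, bMaxList]
      rw [pyListLt_nil_right (g x)]
      simp only [Bool.false_eq_true, if_false]
      exact foldmax_gen g l' (g x)

-- ===== VERDICT (by name: the statement is the Claim_ definition above) =====
theorem solution_spec : Claim_equal_solution := by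
  intro nums1 nums2 k _dom
  unfold Spec_solution solution solution_alt
  dsimp only
  rw [PySem.List.foldl_congr_mem _ _
    (fun res x => if pyListLt (bMerge (bPick nums1 x) (bPick nums2 (k - x))) res then res
          else bMerge (bPick nums1 x) (bPick nums2 (k - x))) _
    (by
      intro acc x hx
      rw [PySem.List.mem_pyRange_one] at hx
      obtain ⟨hlo, hhi⟩ := hx
      have ha : (0 : Int) ≤ max 0 (k - (nums2.length : Int)) := le_max_left _ _
      have hb : min k (nums1.length : Int) ≤ (nums1.length : Int) := min_le_right _ _
      have hc : min k (nums1.length : Int) ≤ k := min_le_left _ _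
      have hd : k - (nums2.length : Int) ≤ max 0 (k - (nums2.length : Int)) := le_max_right _ _
      rw [pick_eq_int nums1 x (by omega) (by omega),
          pick_eq_int nums2 (k - x) (by omega) (by omega),
          merge_eq])]
  exact foldmax _ _
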